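-- pv_equiv track=rewrite | github.com/sarans02/BNFO-615--ML | formatdata2.py | blast_like_alignment_fast
-- ===== SOURCE A (Python) =====
-- def blast_like_alignment_fast(seq1, seq2):
--     score=0
--     seq2htlist={}
--     for i in range(0, len(seq2), 1):
--         kmer2=seq2[i:i+3]
--         seq2htlist[kmer2]=1
--     for i in range(0, len(seq1), 1):
--         kmer1=seq1[i:i+3]
--         if(seq2htlist.get(kmer1) != None):
--             score=score+1
--     return score
-- ===== SOURCE B (Python) =====
-- def blast_like_alignment_fast(seq1, seq2):
--     kmers1 = sorted(seq1[i:i+3] for i in range(len(seq1)))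
--     kmers2 = sorted(set(seq2[i:i+3] for i in range(len(seq2))))
--     i = j = score = 0
--     while i < len(kmers1) and j < len(kmers2):
--         if kmers1[i] < kmers2[j]:
--             i += 1
--         elif kmers2[j] < kmers1[i]:
--             j += 1
--         else:
--             score += 1
--             i += 1
--     return score
-- ===== Notes on version B (the rewrite author's own statement) =====
-- stated objective: alternative
-- what changed: Replaces A's hash-table membership scheme by sort-then-merge: both k-mer lists are sorted (seq2's deduplicated) and a two-pointer merge walk counts seq1 k-mers present among seq2's.
import Mathlib
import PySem

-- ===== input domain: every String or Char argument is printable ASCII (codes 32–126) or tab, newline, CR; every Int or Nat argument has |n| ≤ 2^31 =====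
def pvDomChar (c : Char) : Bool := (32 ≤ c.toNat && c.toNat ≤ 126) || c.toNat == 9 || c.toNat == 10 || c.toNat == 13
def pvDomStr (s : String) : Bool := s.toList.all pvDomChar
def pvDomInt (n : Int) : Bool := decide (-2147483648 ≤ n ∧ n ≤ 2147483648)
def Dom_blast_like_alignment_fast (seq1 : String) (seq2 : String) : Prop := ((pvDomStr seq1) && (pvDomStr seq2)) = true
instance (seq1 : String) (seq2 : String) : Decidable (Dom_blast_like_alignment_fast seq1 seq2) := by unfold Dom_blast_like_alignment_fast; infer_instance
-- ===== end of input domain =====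

-- B replaces A's hash-table membership scheme by sort-then-merge: both k-mer lists are sorted
-- (seq2's deduplicated) and a two-pointer merge walk counts seq1 k-mers present among seq2's.

-- ===== PORT A =====
def blast_like_alignment_fast (seq1 : String) (seq2 : String) : Int :=
  let score : Int := 0
  let seq2htlist : PySem.Dict String Int :=
    (PySem.List.pyRange 0 (PySem.Str.len seq2) 1).foldl
      (fun d i => d.insert (PySem.Str.slice seq2 (some i) (some (i + 3))) 1) PySem.Dict.empty
  (PySem.List.pyRange 0 (PySem.Str.len seq1) 1).foldl
    (fun score i =>
      if seq2htlist.get? (PySem.Str.slice seq1 (some i) (some (i + 3))) ≠ none then score + 1 else score) score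

-- ===== PORT B =====
-- the while loop with indices i, j over the two sorted lists, as the obvious recursion on the suffixes
def pvMergeCount : List String → List String → Int → Int
  | [], _, score => score
  | _ :: _, [], score => score
  | a :: l1, b :: l2, score =>
    if a < b then pvMergeCount l1 (b :: l2) score
    else if b < a then pvMergeCount (a :: l1) l2 score
    else pvMergeCount l1 (b :: l2) (score + 1)
termination_by l1 l2 _ => l1.length + l2.length

def blast_like_alignment_fast_alt (seq1 : String) (seq2 : String) : Int :=
  let kmers1 : List String :=
    PySem.List.sorted ((PySem.List.pyRange 0 (PySem.Str.len seq1) 1).map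
      (fun i => PySem.Str.slice seq1 (some i) (some (i + 3)))) (fun x => x) false
  let kmers2 : List String :=
    PySem.List.sorted (PySem.Set.ofList ((PySem.List.pyRange 0 (PySem.Str.len seq2) 1).map
      (fun i => PySem.Str.slice seq2 (some i) (some (i + 3))))) (fun x => x) false
  pvMergeCount kmers1 kmers2 0

-- ===== PRECONDITION & SPEC =====
def Spec_blast_like_alignment_fast (seq1 : String) (seq2 : String) (out : Int) : Prop := out = blast_like_alignment_fast_alt seq1 seq2
instance (seq1 : String) (seq2 : String) (out : Int) : Decidable (Spec_blast_like_alignment_fast seq1 seq2 out) := by unfold Spec_blast_like_alignment_fast; infer_instance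

-- ===== CLAIM (what is proved, stated in full; the proofs are below) =====
def Claim_equal_blast_like_alignment_fast : Prop := ∀ (seq1 : String) (seq2 : String), Dom_blast_like_alignment_fast seq1 seq2 → Spec_blast_like_alignment_fast seq1 seq2 (blast_like_alignment_fast seq1 seq2)

-- ===== LEMMAS AND PROOFS =====

-- the merge walk over a ≤-sorted l1 and a <-sorted l2 counts the members of l1 that lie in l2
lemma mergeCount_eq_countP (l1 l2 : List String) (s : Int)
    (h1 : l1.Pairwise (· ≤ ·)) (h2 : l2.Pairwise (· < ·)) :
    pvMergeCount l1 l2 s = s + (l1.countP (fun k => decide (k ∈ l2)) : Int) := by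
  fun_induction pvMergeCount l1 l2 s with
  | case1 l2 s => simp
  | case2 a l1 s => simp
  | case3 a l1 b l2 s hab ih =>
    have hnot : a ∉ b :: l2 := by
      intro hm
      rcases List.mem_cons.mp hm with h | h
      · exact lt_irrefl b (h ▸ hab)
      · exact lt_asymm hab ((List.pairwise_cons.mp h2).1 a h)
    rw [ih (List.Pairwise.of_cons h1) h2, List.countP_cons]
    simp [hnot]
  | case4 a l1 b l2 s hab hba ih =>
    have hmem : ∀ y ∈ a :: l1, (y ∈ b :: l2) = (y ∈ l2) := by
      intro y hy
      have hay : a ≤ y := by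
        rcases List.mem_cons.mp hy with h | h
        · exact h.ge
        · exact (List.pairwise_cons.mp h1).1 y h
      have : y ≠ b := fun h => absurd (h ▸ hay) (not_le.mpr hba)
      simp [List.mem_cons, this]
    rw [ih h1 (List.Pairwise.of_cons h2)]
    congr 2
    exact List.countP_congr (fun y hy => by simp [hmem y hy])
  | case5 a l1 b l2 s hab hba ih =>
    have heq : a = b := le_antisymm (not_lt.mp hba) (not_lt.mp hab)
    rw [ih (List.Pairwise.of_cons h1) h2, List.countP_cons]
    simp [heq]
    omega

lemma kmer_equiv (seq1 seq2 : String) :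
    blast_like_alignment_fast seq1 seq2 = blast_like_alignment_fast_alt seq1 seq2 := by
  unfold blast_like_alignment_fast blast_like_alignment_fast_alt
  simp only []
  set r1 := PySem.List.pyRange 0 (PySem.Str.len seq1) 1 with hr1
  set r2 := PySem.List.pyRange 0 (PySem.Str.len seq2) 1 with hr2
  set L1 := r1.map (fun i => PySem.Str.slice seq1 (some i) (some (i + 3))) with hL1
  set L2 := r2.map (fun i => PySem.Str.slice seq2 (some i) (some (i + 3))) with hL2
  -- membership in A's dict is membership in the seq2 k-mer list
  have hd : ∀ k, (r2.foldl (fun d i =>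
        d.insert (PySem.Str.slice seq2 (some i) (some (i + 3))) (1 : Int)) PySem.Dict.empty).get? k ≠ none
      ↔ k ∈ L2 := by
    intro k
    rw [← List.foldl_map (f := fun i => PySem.Str.slice seq2 (some i) (some (i + 3)))
          (g := fun (d : PySem.Dict String Int) k => d.insert k 1), ← hL2,
        Ne, PySem.Dict.get?_eq_none_iff_not_mem_keys, not_not,
        PySem.Dict.keys_foldl_insert L2 (fun _ _ => (1 : Int)) PySem.Dict.empty,
        PySem.Dict.keys_empty, PySem.Set.update_nil_left, PySem.Set.mem_ofList]
  -- A's counting loop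
  have hA : (r1.foldl (fun score i =>
        if (r2.foldl (fun d i => d.insert (PySem.Str.slice seq2 (some i) (some (i + 3))) (1 : Int))
            PySem.Dict.empty).get? (PySem.Str.slice seq1 (some i) (some (i + 3))) ≠ none
        then score + 1 else score) (0 : Int))
      = (L1.countP (fun k => decide (k ∈ L2)) : Int) := by
    rw [← List.foldl_map (f := fun i => PySem.Str.slice seq1 (some i) (some (i + 3)))
          (g := fun (s : Int) k =>
            if (r2.foldl (fun d i => d.insert (PySem.Str.slice seq2 (some i) (some (i + 3))) (1 : Int))
                PySem.Dict.empty).get? k ≠ none then s + 1 else s), ← hL1]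
    simp only [hd]
    rw [PySem.List.foldl_ite_add_one (fun k => k ∈ L2) L1 0, zero_add]
  rw [hA]
  -- B's merge walk
  rw [mergeCount_eq_countP _ _ 0
        (by simpa using PySem.List.sorted_pairwise L1 (fun x : String => x))
        (PySem.List.sorted_ofList_pairwise_lt L2), zero_add]
  rw [((PySem.List.sorted_perm L1 (fun x : String => x) false).countP_eq _).symm]
  refine congrArg _ (List.countP_congr (fun y _ => ?_))
  simp [PySem.List.mem_sorted, PySem.Set.mem_ofList]

-- ===== VERDICT (by name: the statement is the Claim_ definition above) =====
theorem blast_like_alignment_fast_spec : Claim_equal_blast_like_alignment_fast := by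
  intro seq1 seq2 _
  exact kmer_equiv seq1 seq2
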